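-- pv_equiv track=rewrite | github.com/BrettRey/erdos-problem-993 | prove_subclaim_A_lc_defect.py | build_aj_coeffs
-- ===== SOURCE A (Python) =====
-- def binom(n: int, r: int) -> int:
--     if r < 0 or r > n:
--         return 0
--     if r == 0 or r == n:
--         return 1
--     r = min(r, n - r)
--     result = 1
--     for i in range(r):
--         result = result * (n - i) // (i + 1)
--     return result
--
-- def build_aj_coeffs(k: int, j: int) -> list[int]:
--     """Coefficients of A_j(x) = (1+2x)^k * (1+x)^j."""
--     n = k + j + 1
--     a = [0] * n
--     for ell in range(k + 1):
--         c_k_ell = binom(k, ell) * (2**ell)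
--         for s in range(j + 1):
--             c_j_s = binom(j, s)
--             t = ell + s
--             if t < n:
--                 a[t] += c_k_ell * c_j_s
--     # Trim trailing zeros
--     while a and a[-1] == 0:
--         a.pop()
--     return a
-- ===== SOURCE B (Python) =====
-- def _pascal_row(m: int) -> list[int]:
--     """Row m of Pascal's triangle: [binom(m,0), ..., binom(m,m)]."""
--     row = [1]
--     for _ in range(m):
--         row = [a + b for a, b in zip([0] + row, row + [0])]
--     return row
--
--
-- def build_aj_coeffs(k: int, j: int) -> list[int]:
--     """Coefficients of A_j(x) = (1+2x)^k * (1+x)^j."""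
--     if k < 0 or j < 0:
--         return []
--     row = _pascal_row(k)
--     p = [row[e] * 2 ** e for e in range(k + 1)]
--     q = _pascal_row(j)
--     return [sum(p[e] * q[t - e] for e in range(k + 1) if 0 <= t - e <= j)
--             for t in range(k + j + 1)]
-- ===== Notes on version B (the rewrite author's own statement) =====
-- stated objective: faster
-- what changed: Replaces the per-iteration multiplicative binomial computation inside the double loop by two Pascal-triangle rows built once, then a direct O(k*j) convolution comprehension (no scatter-add array, no trailing-zero trim needed since the leading coefficient 2^k is nonzero).
import Mathlib
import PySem

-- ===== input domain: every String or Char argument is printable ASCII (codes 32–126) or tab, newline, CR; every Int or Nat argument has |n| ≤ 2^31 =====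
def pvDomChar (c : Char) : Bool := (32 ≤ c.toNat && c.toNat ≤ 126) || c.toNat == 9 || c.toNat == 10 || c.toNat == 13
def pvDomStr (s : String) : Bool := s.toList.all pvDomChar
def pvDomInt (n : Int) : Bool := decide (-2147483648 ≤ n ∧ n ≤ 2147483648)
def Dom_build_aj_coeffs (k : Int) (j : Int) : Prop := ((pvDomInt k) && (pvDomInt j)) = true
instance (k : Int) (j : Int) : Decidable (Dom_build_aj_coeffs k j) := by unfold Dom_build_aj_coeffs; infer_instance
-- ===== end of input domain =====

-- B replaces A's per-iteration multiplicative binomials inside the double scatter-add loop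
-- with two Pascal rows built once plus a direct convolution comprehension.

-- ===== PORT A =====
def binomA (n r : Int) : Int :=
  if r < 0 ∨ r > n then 0
  else if r = 0 ∨ r = n then 1
  else
    let r' := min r (n - r)
    (PySem.List.pyRange 0 r' 1).foldl
      (fun result i => PySem.Int.floordiv (result * (n - i)) (i + 1)) 1

-- while a and a[-1] == 0: a.pop()
def trimA (a : List Int) : List Int :=
  if a ≠ [] ∧ a.getLast? = some 0 then trimA a.dropLast else a
termination_by a.length
decreasing_by
  rename_i h
  have : a ≠ [] := h.1
  cases a with
  | nil => simp at this
  | cons x xs => simp [List.length_dropLast]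

def build_aj_coeffs (k : Int) (j : Int) : List Int :=
  let n := k + j + 1
  let a0 : List Int := List.replicate n.toNat 0
  let a :=
    (PySem.List.pyRange 0 (k + 1) 1).foldl (fun a ell =>
      let c_k_ell := binomA k ell * 2 ^ ell.toNat
      (PySem.List.pyRange 0 (j + 1) 1).foldl (fun a s =>
        let c_j_s := binomA j s
        let t := ell + s
        if t < n then a.set t.toNat (a.getD t.toNat 0 + c_k_ell * c_j_s) else a) a) a0
  trimA a

-- ===== PORT B =====
def pascalRow : Nat → List Int
  | 0 => [1]
  | m + 1 => List.zipWith (· + ·) (0 :: pascalRow m) (pascalRow m ++ [0])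

def build_aj_coeffs_alt (k : Int) (j : Int) : List Int :=
  if k < 0 ∨ j < 0 then []
  else
    let row := pascalRow k.toNat
    let p := (List.range (k.toNat + 1)).map (fun e => row.getD e 0 * 2 ^ e)
    let q := pascalRow j.toNat
    (List.range (k + j + 1).toNat).map (fun t =>
      ((List.range (k.toNat + 1)).map (fun e =>
        if e ≤ t ∧ t - e ≤ j.toNat then p.getD e 0 * q.getD (t - e) 0 else 0)).sum)

-- ===== PRECONDITION & SPEC =====
def Spec_build_aj_coeffs (k : Int) (j : Int) (out : List Int) : Prop := out = build_aj_coeffs_alt k j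
instance (k : Int) (j : Int) (out : List Int) : Decidable (Spec_build_aj_coeffs k j out) := by unfold Spec_build_aj_coeffs; infer_instance

-- ===== CLAIM (what is proved, stated in full; the proofs are below) =====
def Claim_equal_build_aj_coeffs : Prop := ∀ (k : Int) (j : Int), Dom_build_aj_coeffs k j → Spec_build_aj_coeffs k j (build_aj_coeffs k j)

-- ===== LEMMAS AND PROOFS =====

theorem pascalRow_eq (m : Nat) :
    pascalRow m = (List.range (m + 1)).map (fun e => ((m.choose e : Nat) : Int)) := by
  induction m with
  | zero => simp [pascalRow]
  | succ m ih =>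
    rw [pascalRow, ih]
    apply List.ext_getElem
    · simp
    · intro i h1 h2
      simp only [List.getElem_zipWith, List.getElem_map, List.getElem_range]
      rcases i with _ | i
      · simp [Nat.choose]
      · have h2' : i + 1 < m + 2 := by simpa using h2
        rw [List.getElem_cons_succ]
        by_cases hi : i + 1 < m + 1
        · rw [List.getElem_append_left (by simpa using hi)]
          simp only [List.getElem_map, List.getElem_range]
          push_cast [Nat.choose_succ_succ']
          ring
        · have : i = m := by omega
          subst this
          rw [List.getElem_append_right (by simp)]
          simp [Nat.choose_succ_succ', Nat.choose_eq_zero_of_lt (by omega)]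

theorem binom_loop (n m : Nat) (hm : m ≤ n) :
    (PySem.List.pyRange 0 (m : Int) 1).foldl
      (fun result i => PySem.Int.floordiv (result * ((n : Int) - i)) (i + 1)) 1
    = ((n.choose m : Nat) : Int) := by
  induction m with
  | zero => simp [PySem.List.pyRange_one_eq_nil]
  | succ m ih =>
    have h1 : ((m + 1 : Nat) : Int) = (m : Int) + 1 := by push_cast; ring
    rw [h1, PySem.List.pyRange_one_succ_right (by positivity), List.foldl_append,
        ih (by omega)]
    simp only [List.foldl_cons, List.foldl_nil]
    have h2 : (n : Int) - (m : Int) = ((n - m : Nat) : Int) := by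
      have : m ≤ n := by omega
      push_cast [this]; ring
    rw [h2]
    have h3 : ((n.choose m : Nat) : Int) * ((n - m : Nat) : Int) = ((n.choose (m+1) * (m+1) : Nat) : Int) := by
      rw [← Nat.cast_mul, ← Nat.choose_succ_right_eq]
    rw [h3]
    have h4 : ((m : Int) + 1) = ((m + 1 : Nat) : Int) := by push_cast; ring
    rw [h4, PySem.Int.floordiv_natCast]
    norm_num

theorem binomA_eq (n r : Nat) : binomA (n : Int) (r : Int) = ((n.choose r : Nat) : Int) := by
  unfold binomA
  by_cases hgt : r > n
  · rw [if_pos (by right; exact_mod_cast hgt), Nat.choose_eq_zero_of_lt hgt]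
    simp
  · rw [if_neg (by push_neg; constructor <;> [positivity; exact_mod_cast (by omega : (r:Nat) ≤ n)])]
    by_cases h0 : r = 0 ∨ r = n
    · rw [if_pos (by rcases h0 with h | h <;> subst h <;> simp)]
      rcases h0 with h | h <;> subst h <;> simp [Nat.choose_self]
    · push_neg at h0
      rw [if_neg (by push_neg; constructor <;> [exact_mod_cast h0.1; exact_mod_cast h0.2])]
      have hmin : min (r : Int) ((n : Int) - r) = ((min r (n - r) : Nat) : Int) := by
        have : r ≤ n := by omega
        push_cast [this]; omega
      simp only [hmin]
      rw [binom_loop n (min r (n - r)) (by omega)]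
      congr 1
      rcases Decidable.em (r ≤ n - r) with h | h
      · rw [min_eq_left h]
      · rw [min_eq_right (by omega : n - r ≤ r)]
        exact Nat.choose_symm (by omega)

theorem foldl_flatMap {α β γ : Type} (f : γ → β → γ) (g : α → List β) (L : List α) (init : γ) :
    (L.flatMap g).foldl f init = L.foldl (fun acc x => (g x).foldl f acc) init := by
  induction L generalizing init with
  | nil => simp
  | cons x xs ih => simp [List.flatMap_cons, List.foldl_append, ih]

theorem sum_flatMap {α : Type} (L : List α) (g : α → List Int) :
    (L.flatMap g).sum = (L.map (fun x => (g x).sum)).sum := by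
  induction L with
  | nil => simp
  | cons x xs ih => simp [List.flatMap_cons, List.sum_append, ih]

theorem scatter_length {α : Type} (L : List α) (a : List Int) (idx : α → Nat) (v : α → Int) :
    (L.foldl (fun a x => a.set (idx x) (a.getD (idx x) 0 + v x)) a).length = a.length := by
  induction L generalizing a with
  | nil => rfl
  | cons x xs ih => rw [List.foldl_cons, ih, List.length_set]

theorem getD_set_lt (a : List Int) (i : Nat) (w : Int) (m : Nat) (hi : i < a.length) :
    (a.set i w).getD m 0 = if i = m then w else a.getD m 0 := by
  by_cases h : i = m
  · subst h
    simp [List.getD_eq_getElem?_getD, List.getElem?_set, hi]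
  · simp [List.getD_eq_getElem?_getD, List.getElem?_set, h]

theorem scatter_getD {α : Type} (L : List α) (a : List Int) (idx : α → Nat) (v : α → Int)
    (m : Nat) (h : ∀ x ∈ L, idx x < a.length) :
    (L.foldl (fun a x => a.set (idx x) (a.getD (idx x) 0 + v x)) a).getD m 0
      = a.getD m 0 + (L.map (fun x => if idx x = m then v x else 0)).sum := by
  induction L generalizing a with
  | nil => simp
  | cons x xs ih =>
    have hx : idx x < a.length := h x (by simp)
    rw [List.foldl_cons, ih _ (fun y hy => by rw [List.length_set]; exact h y (by simp [hy]))]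
    rw [getD_set_lt a (idx x) _ m hx]
    simp only [List.map_cons, List.sum_cons]
    by_cases hm : idx x = m <;> simp [hm] <;> ring

theorem sum_indicator (c : Nat → Int) (n v : Nat) :
    ((List.range n).map (fun s => if s = v then c s else 0)).sum = if v < n then c v else 0 := by
  induction n with
  | zero => simp
  | succ n ih =>
    rw [List.range_succ, List.map_append, List.sum_append, ih]
    by_cases h1 : v < n
    · simp [h1, Nat.lt_succ_of_lt h1, Nat.ne_of_gt h1]
    · by_cases h2 : n = v
      · subst h2; simp [h1]
      · have : ¬ v < n + 1 := by omega
        simp [h1, h2, this]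

theorem trimA_of_last_ne (a : List Int) (x : Int) (hlast : a.getLast? = some x) (hx : x ≠ 0) :
    trimA a = a := by
  rw [trimA, if_neg]
  rintro ⟨-, h⟩
  rw [hlast] at h
  exact hx (by injection h)

theorem trimA_replicate (m : Nat) : trimA (List.replicate m (0 : Int)) = [] := by
  induction m with
  | zero => rw [trimA, if_neg (by simp)]; rfl
  | succ m ih =>
    rw [List.replicate_succ', trimA,
        if_pos ⟨by simp, by rw [List.getLast?_concat]⟩,
        List.dropLast_concat]
    exact ih

theorem main_eq (k j : Int) : build_aj_coeffs k j = build_aj_coeffs_alt k j := by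
  by_cases hneg : k < 0 ∨ j < 0
  · -- a degenerate exponent: both sides are []
    rw [build_aj_coeffs_alt, if_pos hneg]
    simp only [build_aj_coeffs]
    rcases hneg with hk | hj
    · rw [PySem.List.pyRange_one_eq_nil (a := 0) (b := k + 1) (by omega), List.foldl_nil]
      exact trimA_replicate _
    · rw [PySem.List.pyRange_one_eq_nil (a := 0) (b := j + 1) (by omega)]
      simp only [List.foldl_nil, PySem.List.foldl_ignore]
      exact trimA_replicate _
  · push_neg at hneg
    obtain ⟨hk, hj⟩ := hneg
    set K := k.toNat with hK
    set J := j.toNat with hJ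
    have hkK : (K : Int) = k := Int.toNat_of_nonneg hk
    have hjJ : (J : Int) = j := Int.toNat_of_nonneg hj
    set N := K + J + 1 with hN
    have hNn : (k + j + 1).toNat = N := by omega
    -- the value B places at slot t
    set q : List Int := pascalRow J with hq
    set p : List Int := (List.range (K + 1)).map (fun e => (pascalRow K).getD e 0 * 2 ^ e) with hp
    set bf : Nat → Int := fun t =>
      ((List.range (K + 1)).map (fun e =>
        if e ≤ t ∧ t - e ≤ J then p.getD e 0 * q.getD (t - e) 0 else 0)).sum with hbf
    have hB : build_aj_coeffs_alt k j = (List.range N).map bf := by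
      rw [build_aj_coeffs_alt, if_neg (by omega)]
      simp only [← hK, ← hJ, hNn, ← hq, ← hp, ← hbf]
    -- characterize B's entries through choose
    have hpe : ∀ e, e ≤ K → p.getD e 0 = ((K.choose e : Nat) : Int) * 2 ^ e := by
      intro e he
      rw [hp, pascalRow_eq, List.getD_eq_getElem?_getD]
      simp [List.getElem?_map, List.getElem?_range, Nat.lt_succ_of_le he]
    have hqe : ∀ s, s ≤ J → q.getD s 0 = ((J.choose s : Nat) : Int) := by
      intro s hs
      rw [hq, pascalRow_eq, List.getD_eq_getElem?_getD]
      simp [List.getElem?_map, List.getElem?_range, Nat.lt_succ_of_le hs]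
    -- the scatter product list
    set P : List (Nat × Nat) :=
      (List.range (K + 1)).flatMap (fun ℓ => (List.range (J + 1)).map (fun s => (ℓ, s))) with hP
    set w : Nat × Nat → Int :=
      fun x => ((K.choose x.1 : Nat) : Int) * 2 ^ x.1 * ((J.choose x.2 : Nat) : Int) with hw
    -- A's loop is a scatter over P
    have hA : build_aj_coeffs k j =
        trimA (P.foldl (fun a x => a.set (x.1 + x.2) (a.getD (x.1 + x.2) 0 + w x))
          (List.replicate N 0)) := by
      simp only [build_aj_coeffs]
      rw [hNn]
      congr 1
      rw [hP, foldl_flatMap]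
      rw [PySem.List.pyRange_one 0 (k + 1), sub_zero,
          show (k + 1).toNat = K + 1 by omega, List.foldl_map]
      apply PySem.List.foldl_congr_mem
      intro acc ℓ hℓ
      rw [PySem.List.pyRange_one 0 (j + 1), sub_zero,
          show (j + 1).toNat = J + 1 by omega, List.foldl_map, List.foldl_map]
      apply PySem.List.foldl_congr_mem
      intro acc' s hs
      rw [List.mem_range] at hℓ hs
      have hg : (0 + (ℓ : Int)) + (0 + (s : Int)) < k + j + 1 := by omega
      rw [if_pos hg]
      have h1 : ((0 + (ℓ : Int)) + (0 + (s : Int))).toNat = ℓ + s := by omega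
      have h2 : (0 + (ℓ : Int)).toNat = ℓ := by omega
      rw [h1, h2]
      have h3 : binomA k (0 + (ℓ : Int)) = ((K.choose ℓ : Nat) : Int) := by
        rw [zero_add, ← hkK]; exact binomA_eq K ℓ
      have h4 : binomA j (0 + (s : Int)) = ((J.choose s : Nat) : Int) := by
        rw [zero_add, ← hjJ]; exact binomA_eq J s
      rw [h3, h4, hw]
    -- compare entrywise
    rw [hA, hB]
    have hPmem : ∀ x ∈ P, x.1 + x.2 < (List.replicate N (0:Int)).length := by
      intro x hx
      rw [hP] at hx
      simp only [List.mem_flatMap, List.mem_map, List.mem_range] at hx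
      obtain ⟨ℓ, hℓ, s, hs, rfl⟩ := hx
      simp [List.length_replicate]
      omega
    have hlen : (P.foldl (fun a x => a.set (x.1 + x.2) (a.getD (x.1 + x.2) 0 + w x))
        (List.replicate N 0)).length = N := by
      rw [scatter_length, List.length_replicate]
    have hentry : ∀ m : Nat,
        (P.foldl (fun a x => a.set (x.1 + x.2) (a.getD (x.1 + x.2) 0 + w x))
          (List.replicate N 0)).getD m 0 = bf m := by
      intro m
      rw [scatter_getD P _ _ _ m hPmem]
      have h0 : (List.replicate N (0:Int)).getD m 0 = 0 := by
        rw [List.getD_eq_getElem?_getD, List.getElem?_replicate]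
        split <;> simp
      rw [h0, zero_add, hP, List.map_flatMap, sum_flatMap, hbf]
      apply congrArg List.sum
      apply List.map_congr_left
      intro ℓ hℓ
      rw [List.mem_range] at hℓ
      simp only [Function.comp, List.map_map]
      by_cases hcase : ℓ ≤ m
      · have heq : ((List.range (J + 1)).map ((fun x => if x.1 + x.2 = m then w x else 0) ∘ (fun s => (ℓ, s))))
            = (List.range (J + 1)).map (fun s => if s = m - ℓ then w (ℓ, s) else 0) := by
          apply List.map_congr_left
          intro s _
          simp only [Function.comp]
          split_ifs with ha hb hb
          · rfl
          · omega
          · omega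
          · rfl
        rw [heq, sum_indicator (fun s => w (ℓ, s)) (J + 1) (m - ℓ)]
        by_cases hle : m - ℓ ≤ J
        · rw [if_pos (by omega), if_pos ⟨hcase, hle⟩, hw,
              hpe ℓ (by omega), hqe (m - ℓ) hle]
        · rw [if_neg (by omega), if_neg (by tauto)]
      · have heq : ((List.range (J + 1)).map ((fun x => if x.1 + x.2 = m then w x else 0) ∘ (fun s => (ℓ, s))))
            = (List.range (J + 1)).map (fun _ => (0 : Int)) := by
          apply List.map_congr_left
          intro s _
          simp only [Function.comp]
          rw [if_neg (by omega)]
        rw [heq, if_neg (by tauto)]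
        simp
    -- the scattered array IS B's list
    have harr : (P.foldl (fun a x => a.set (x.1 + x.2) (a.getD (x.1 + x.2) 0 + w x))
        (List.replicate N 0)) = (List.range N).map bf := by
      apply List.ext_getElem
      · rw [hlen]; simp
      · intro i h1 h2
        rw [← List.getD_eq_getElem _ 0 h1, hentry i]
        simp
    rw [harr]
    -- the last entry is 2^K ≠ 0, so the trim is the identity
    have hlast : ((List.range N).map bf).getLast? = some (bf (K + J)) := by
      rw [List.getLast?_eq_getElem?]
      simp [hN, List.getElem?_range, List.getElem?_map]
    have hbfval : bf (K + J) = 2 ^ K := by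
      simp only [hbf]
      have heq : ((List.range (K + 1)).map (fun e =>
          if e ≤ K + J ∧ K + J - e ≤ J then p.getD e 0 * q.getD (K + J - e) 0 else 0))
          = (List.range (K + 1)).map (fun e => if e = K then 2 ^ K else 0) := by
        apply List.map_congr_left
        intro e he
        rw [List.mem_range] at he
        by_cases hc : e = K
        · rw [if_pos ⟨by omega, by omega⟩, if_pos hc, hc,
              hpe K le_rfl, hqe (K + J - K) (by omega)]
          simp [Nat.choose_self, show K + J - K = J by omega]
        · rw [if_neg (by omega), if_neg hc]
      rw [heq, sum_indicator (fun _ => (2:Int) ^ K) (K + 1) K, if_pos (by omega)]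
    exact trimA_of_last_ne _ _ (by rw [hlast, hbfval]) (by positivity)

-- ===== VERDICT (by name: the statement is the Claim_ definition above) =====
theorem build_aj_coeffs_spec : Claim_equal_build_aj_coeffs := by
  intro k j _
  unfold Spec_build_aj_coeffs
  exact main_eq k j
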